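-- pv_equiv track=rewrite | github.com/bfemiano/misc_scripts | python/min_sprints.py | minSprint
-- ===== SOURCE A (Python) =====
-- def minSprint(n, deps):
--     if n == 1:
--         return 1
--     sprints = 0
--     deps_graph = dict()
--     for d in deps:
--         if d[1] not in deps_graph.keys():
--             deps_graph[d[1]] = set()
--         if d[0] not in deps_graph.keys():
--             deps_graph[d[0]] = set()
--         deps_graph[d[1]].add(d[0])
--
--     jobsLeft = n
--     jobsRun = set()
--     while(jobsLeft > 0):
--         jobsRunThisSprint = set()
--         for job_id in deps_graph.keys():
--             deps = deps_graph[job_id]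
--             if deps - jobsRun == set() and deps.intersection(jobsRunThisSprint) == set() and job_id not in jobsRun:
--                 jobsLeft -= 1
--                 jobsRun.add(job_id)
--                 jobsRunThisSprint.add(job_id)
--         sprints += 1
--
--     return sprints
-- ===== SOURCE B (Python) =====
-- def minSprint(n, deps):
--     if n == 1:
--         return 1
--     indeg = {}
--     out = {}
--     edges = set()
--     for a, b in deps:
--         if b not in indeg:
--             indeg[b] = 0
--         if a not in indeg:
--             indeg[a] = 0
--         if (a, b) not in edges:
--             edges.add((a, b))
--             indeg[b] += 1
--             out.setdefault(a, []).append(b)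
--     frontier = [v for v in indeg if indeg[v] == 0]
--     sprints = 0
--     finished = 0
--     while finished < n:
--         sprints += 1
--         finished += len(frontier)
--         nxt = []
--         for u in frontier:
--             for v in out.get(u, []):
--                 indeg[v] -= 1
--                 if indeg[v] == 0:
--                     nxt.append(v)
--         frontier = nxt
--     return sprints
-- ===== Notes on version B (the rewrite author's own statement) =====
-- stated objective: alternative
-- what changed: A rescans every job and re-does set differences/intersections against the full run-set in every sprint until n jobs are done; B instead runs Kahn's algorithm: it builds in-degree counters and deduplicated adjacency lists in one pass, then advances a per-sprint frontier of newly runnable jobs, returning the sprint at which the finished count reaches n.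
import Mathlib
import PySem

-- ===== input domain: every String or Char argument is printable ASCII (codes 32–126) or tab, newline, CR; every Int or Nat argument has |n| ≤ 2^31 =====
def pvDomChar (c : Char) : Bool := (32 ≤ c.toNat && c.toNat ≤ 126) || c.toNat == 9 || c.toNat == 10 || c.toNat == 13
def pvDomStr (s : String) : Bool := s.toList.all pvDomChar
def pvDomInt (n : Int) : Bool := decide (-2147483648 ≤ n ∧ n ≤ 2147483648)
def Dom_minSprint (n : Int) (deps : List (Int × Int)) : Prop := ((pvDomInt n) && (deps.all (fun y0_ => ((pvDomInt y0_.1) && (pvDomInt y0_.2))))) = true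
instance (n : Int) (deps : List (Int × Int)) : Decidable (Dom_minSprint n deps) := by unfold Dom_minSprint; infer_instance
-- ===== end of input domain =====

-- B replaces A's per-sprint rescans of every job (with set differences against the full
-- run-set) by Kahn's algorithm: in-degree counters and a per-sprint frontier of newly
-- runnable jobs; the answer is the sprint at which the finished count reaches n.

-- ===== PORT A =====
-- one sprint: 'for job_id in deps_graph.keys(): …' mutating (jobsLeft, jobsRun, jobsRunThisSprint)
def minSprintRound (g : PySem.Dict Int (PySem.Set Int))
    (st : Int × PySem.Set Int × PySem.Set Int) : Int × PySem.Set Int × PySem.Set Int :=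
  g.keys.foldl (fun st job_id =>
    let ds := g.getD job_id PySem.Set.empty           -- deps = deps_graph[job_id] (key present)
    if PySem.Set.equal (PySem.Set.diff ds st.2.1) PySem.Set.empty
        && PySem.Set.equal (PySem.Set.inter ds st.2.2) PySem.Set.empty
        && !(PySem.Set.contains st.2.1 job_id)
    then (st.1 - 1, PySem.Set.add st.2.1 job_id, PySem.Set.add st.2.2 job_id)
    else st) st

-- 'while jobsLeft > 0': fuel-counted; on inputs satisfying Pre_ the loop runs at most
-- 2*deps.length + 1 times (proved below), so the fuel is never exhausted there.
def minSprintLoop (g : PySem.Dict Int (PySem.Set Int)) :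
    Nat → Int → PySem.Set Int → Int → Int
  | 0, _, _, sprints => sprints
  | fuel+1, jobsLeft, jobsRun, sprints =>
    if jobsLeft > 0 then
      let st := minSprintRound g (jobsLeft, jobsRun, PySem.Set.empty)
      minSprintLoop g fuel st.1 st.2.1 (sprints + 1)
    else sprints

def minSprint (n : Int) (deps : List (Int × Int)) : Int :=
  if n == 1 then 1
  else
    let g : PySem.Dict Int (PySem.Set Int) :=
      deps.foldl (fun g d =>
        let g := if g.contains d.2 then g else g.insert d.2 PySem.Set.empty
        let g := if g.contains d.1 then g else g.insert d.1 PySem.Set.empty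
        g.modify d.2 PySem.Set.empty (fun s => PySem.Set.add s d.1)) PySem.Dict.empty
    minSprintLoop g (2 * deps.length + 2) n PySem.Set.empty 0

-- ===== PORT B =====
-- build indegree dict, dedup'd adjacency lists, edge set (one pass over deps)
def minSprintAltBuild (deps : List (Int × Int)) :
    PySem.Dict Int Int × PySem.Dict Int (List Int) × PySem.Set (Int × Int) :=
  deps.foldl (fun st d =>
    let indeg := if st.1.contains d.2 then st.1 else st.1.insert d.2 0
    let indeg := if indeg.contains d.1 then indeg else indeg.insert d.1 0
    if PySem.Set.contains st.2.2 d then (indeg, st.2.1, st.2.2)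
    else (indeg.modify d.2 0 (· + 1),
          (st.2.1).modify d.1 [] (· ++ [d.2]),       -- out.setdefault(a, []).append(b)
          PySem.Set.add st.2.2 d))
    (PySem.Dict.empty, PySem.Dict.empty, PySem.Set.empty)

-- 'for u in frontier: for v in out.get(u, []): …' building (indeg, nxt)
def minSprintAltRound (out : PySem.Dict Int (List Int))
    (st : PySem.Dict Int Int × List Int) (frontier : List Int) :
    PySem.Dict Int Int × List Int :=
  frontier.foldl (fun st u =>
    (out.getD u []).foldl (fun st v =>
      let indeg := st.1.modify v 0 (· - 1)            -- indeg[v] -= 1 (key present)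
      if indeg.getD v 0 == 0 then (indeg, st.2 ++ [v]) else (indeg, st.2)) st) st

-- 'while finished < n': fuel-counted exactly like A's loop
def minSprintAltLoop (out : PySem.Dict Int (List Int)) :
    Nat → PySem.Dict Int Int → List Int → Int → Int → Int → Int
  | 0, _, _, _, _, sprints => sprints
  | fuel+1, indeg, frontier, n, finished, sprints =>
    if finished < n then
      let st := minSprintAltRound out (indeg, []) frontier
      minSprintAltLoop out fuel st.1 st.2 n (finished + frontier.length) (sprints + 1)
    else sprints

def minSprint_alt (n : Int) (deps : List (Int × Int)) : Int :=
  if n == 1 then 1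
  else
    let b := minSprintAltBuild deps
    let frontier := b.1.keys.filter (fun v => b.1.getD v 0 == 0)
    minSprintAltLoop b.2.1 (2 * deps.length + 2) b.1 frontier n 0 0

-- ===== PRECONDITION & SPEC =====
-- pvNodes: the job ids mentioned in deps, in A's dict-insertion order; pvPreds v: the distinct
-- prerequisites of v; pvStep closes a set of runnable jobs under 'all prerequisites runnable'.
def pvNodes (deps : List (Int × Int)) : List Int :=
  deps.foldl (fun l d => PySem.Set.add (PySem.Set.add l d.2) d.1) []
def pvPreds (deps : List (Int × Int)) (v : Int) : List Int :=
  PySem.Set.ofList ((deps.filter (fun d => d.2 == v)).map (·.1))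
def pvStep (deps : List (Int × Int)) (S : List Int) : List Int :=
  S ++ (pvNodes deps).filter (fun v => !S.contains v && (pvPreds deps v).all S.contains)
def pvD (deps : List (Int × Int)) (k : Nat) : List Int := (pvStep deps)^[k] []

-- Pre_ excludes exactly the inputs on which Python A never returns (its 'while jobsLeft > 0'
-- loop spins forever): n ≥ 2 while fewer than n jobs ever become runnable, because deps
-- mentions too few jobs or because jobs sit on / behind a dependency cycle. A job is
-- eventually runnable iff it is in the closure of 'all prerequisites runnable'; there is no
-- simpler closed form for that than the saturated closure below.
def Pre_minSprint (n : Int) (deps : List (Int × Int)) : Prop :=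
  n ≤ 1 ∨ n ≤ (pvD deps (pvNodes deps).length).length
instance (n : Int) (deps : List (Int × Int)) : Decidable (Pre_minSprint n deps) := by
  unfold Pre_minSprint; infer_instance

def pvWitness_minSprint : Int × (List (Int × Int)) := (3, [(1, 2), (1, 3)])

def Spec_minSprint (n : Int) (deps : List (Int × Int)) (out : Int) : Prop := out = minSprint_alt n deps
instance (n : Int) (deps : List (Int × Int)) (out : Int) : Decidable (Spec_minSprint n deps out) := by unfold Spec_minSprint; infer_instance

-- ===== CLAIM (what is proved, stated in full; the proofs are below) =====
def Claim_equal_minSprint : Prop := ∀ (n : Int) (deps : List (Int × Int)), Dom_minSprint n deps → Pre_minSprint n deps → Spec_minSprint n deps (minSprint n deps)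

-- ===== LEMMAS AND PROOFS =====

-- helper: two nodup lists with the same members have the same length
lemma pvLenEq {l1 l2 : List Int} (h1 : l1.Nodup) (h2 : l2.Nodup)
    (h : ∀ x, x ∈ l1 ↔ x ∈ l2) : l1.length = l2.length := by
  have : l1.Perm l2 := List.perm_of_nodup_nodup_toFinset_eq h1 h2 (by
    ext x; simp [List.mem_toFinset, h x])
  exact this.length_eq

-- pvNodes
lemma pvNodes_aux (l : List (Int × Int)) (s : List Int) (hs : s.Nodup) :
    (l.foldl (fun l d => PySem.Set.add (PySem.Set.add l d.2) d.1) s).Nodup ∧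
    (∀ x, x ∈ (l.foldl (fun l d => PySem.Set.add (PySem.Set.add l d.2) d.1) s) ↔
       x ∈ s ∨ ∃ d ∈ l, x = d.1 ∨ x = d.2) := by
  induction l generalizing s with
  | nil => simpa using hs
  | cons d t ih =>
    have hn : (PySem.Set.add (PySem.Set.add s d.2) d.1).Nodup :=
      PySem.Set.nodup_add _ _ (PySem.Set.nodup_add _ _ hs)
    obtain ⟨hnd, hm⟩ := ih _ hn
    refine ⟨hnd, fun x => ?_⟩
    rw [List.foldl_cons, hm x]
    simp only [PySem.Set.mem_add, List.mem_cons]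
    constructor
    · rintro ((((h|h)|h)|⟨a,hab,hx⟩))
      · exact Or.inl h
      · exact Or.inr ⟨d, Or.inl rfl, Or.inr h⟩
      · exact Or.inr ⟨d, Or.inl rfl, Or.inl h⟩
      · exact Or.inr ⟨a, Or.inr hab, hx⟩
    · rintro (h | ⟨a, (rfl | hab), hx⟩)
      · exact Or.inl (Or.inl (Or.inl h))
      · rcases hx with rfl|rfl
        · exact Or.inl (Or.inr rfl)
        · exact Or.inl (Or.inl (Or.inr rfl))
      · exact Or.inr ⟨a, hab, hx⟩

lemma nodup_pvNodes (deps : List (Int × Int)) : (pvNodes deps).Nodup :=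
  (pvNodes_aux deps [] List.nodup_nil).1

lemma mem_pvNodes (deps : List (Int × Int)) (x : Int) :
    x ∈ pvNodes deps ↔ ∃ d ∈ deps, x = d.1 ∨ x = d.2 := by
  rw [pvNodes, (pvNodes_aux deps [] List.nodup_nil).2 x]; simp

lemma length_pvNodes_le (deps : List (Int × Int)) :
    (pvNodes deps).length ≤ 2 * deps.length := by
  have aux : ∀ (l : List (Int × Int)) (s : List Int),
      (l.foldl (fun l d => PySem.Set.add (PySem.Set.add l d.2) d.1) s).length ≤
        s.length + 2 * l.length := by
    intro l
    induction l with
    | nil => simp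
    | cons d t ih =>
      intro s
      calc (List.foldl _ (PySem.Set.add (PySem.Set.add s d.2) d.1) t).length
          ≤ (PySem.Set.add (PySem.Set.add s d.2) d.1).length + 2 * t.length := ih _
        _ ≤ s.length + 2 * (d :: t).length := by
            have h1 : (PySem.Set.add (PySem.Set.add s d.2) d.1).length ≤
                (PySem.Set.add s d.2).length + 1 := by
              rw [PySem.Set.add_eq_ite]; split <;> simp
            have h2 : (PySem.Set.add s d.2).length ≤ s.length + 1 := by
              rw [PySem.Set.add_eq_ite]; split <;> simp
            simp only [List.length_cons]; omega
  simpa using aux deps []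

-- pvPreds
lemma nodup_pvPreds (deps : List (Int × Int)) (v : Int) : (pvPreds deps v).Nodup :=
  PySem.Set.nodup_ofList _

lemma mem_pvPreds (deps : List (Int × Int)) (v u : Int) :
    u ∈ pvPreds deps v ↔ (u, v) ∈ deps := by
  rw [pvPreds, PySem.Set.mem_ofList]
  constructor
  · rintro h
    simp only [List.mem_map, List.mem_filter] at h
    obtain ⟨d, ⟨hd, hdv⟩, rfl⟩ := h
    have : d.2 = v := by simpa using hdv
    exact this ▸ hd
  · intro h
    simp only [List.mem_map, List.mem_filter]
    exact ⟨(u, v), ⟨h, by simp⟩, rfl⟩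

lemma edge_snd_mem_nodes {deps : List (Int × Int)} {v u : Int} (h : (u, v) ∈ deps) :
    v ∈ pvNodes deps := by
  rw [mem_pvNodes]; exact ⟨(u, v), h, Or.inr rfl⟩

-- pvD
def pvNew (deps : List (Int × Int)) (S : List Int) : List Int :=
  (pvNodes deps).filter (fun v => !S.contains v && (pvPreds deps v).all S.contains)

lemma pvD_zero (deps : List (Int × Int)) : pvD deps 0 = [] := rfl

lemma pvD_succ (deps : List (Int × Int)) (k : Nat) :
    pvD deps (k + 1) = pvD deps k ++ pvNew deps (pvD deps k) := by
  rw [pvD, Function.iterate_succ_apply']; rfl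

lemma mem_pvNew {deps : List (Int × Int)} {S : List Int} (v : Int) :
    v ∈ pvNew deps S ↔ v ∈ pvNodes deps ∧ v ∉ S ∧ ∀ u ∈ pvPreds deps v, u ∈ S := by
  simp [pvNew, List.mem_filter]

lemma pvD_subset_nodes {deps : List (Int × Int)} {k : Nat} {v : Int}
    (h : v ∈ pvD deps k) : v ∈ pvNodes deps := by
  induction k with
  | zero => simp [pvD_zero] at h
  | succ k ih =>
    rw [pvD_succ, List.mem_append] at h
    rcases h with h | h
    · exact ih h
    · exact ((mem_pvNew v).1 h).1

lemma mem_pvD_succ {deps : List (Int × Int)} {k : Nat} (v : Int) :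
    v ∈ pvD deps (k + 1) ↔ v ∈ pvD deps k ∨
      (v ∈ pvNodes deps ∧ ∀ u ∈ pvPreds deps v, u ∈ pvD deps k) := by
  rw [pvD_succ, List.mem_append, mem_pvNew]
  by_cases h : v ∈ pvD deps k <;> simp [h]

lemma pvD_mono {deps : List (Int × Int)} {j k : Nat} (h : j ≤ k) {v : Int}
    (hv : v ∈ pvD deps j) : v ∈ pvD deps k := by
  induction k with
  | zero => exact Nat.le_zero.mp h ▸ hv
  | succ k ih =>
    rcases Nat.lt_succ_iff_lt_or_eq.mp (Nat.lt_succ_of_le h) with h' | rfl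
    · exact (mem_pvD_succ v).2 (Or.inl (ih (Nat.lt_succ_iff.mp h')))
    · exact hv
-- ===== saturation of pvD =====
lemma length_pvD_succ (deps : List (Int × Int)) (k : Nat) :
    (pvD deps (k + 1)).length = (pvD deps k).length + (pvNew deps (pvD deps k)).length := by
  rw [pvD_succ, List.length_append]

-- v running at sprint k+1 has all its prerequisites run by sprint k
lemma pvPreds_sub_of_mem {deps : List (Int × Int)} :
    ∀ {k : Nat} {v : Int}, v ∈ pvD deps (k + 1) → ∀ u ∈ pvPreds deps v, u ∈ pvD deps k := by
  intro k
  induction k with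
  | zero =>
    intro v hv u hu
    rcases (mem_pvD_succ v).1 hv with h | h
    · simp [pvD_zero] at h
    · exact h.2 u hu
  | succ k ih =>
    intro v hv u hu
    rcases (mem_pvD_succ v).1 hv with h | h
    · exact pvD_mono (Nat.le_succ k) (ih h u hu)
    · exact h.2 u hu
-- ===== A side =====
def pvGraphA (deps : List (Int × Int)) : PySem.Dict Int (PySem.Set Int) :=
  deps.foldl (fun g d =>
    let g := if g.contains d.2 then g else g.insert d.2 PySem.Set.empty
    let g := if g.contains d.1 then g else g.insert d.1 PySem.Set.empty
    g.modify d.2 PySem.Set.empty (fun s => PySem.Set.add s d.1)) PySem.Dict.empty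

lemma minSprint_eq (n : Int) (deps : List (Int × Int)) :
    minSprint n deps = if n == 1 then 1
      else minSprintLoop (pvGraphA deps) (2 * deps.length + 2) n PySem.Set.empty 0 := rfl

lemma pvNodes_append (E : List (Int × Int)) (d : Int × Int) :
    pvNodes (E ++ [d]) = PySem.Set.add (PySem.Set.add (pvNodes E) d.2) d.1 := by
  rw [pvNodes, List.foldl_append]; rfl

lemma pvPreds_append (E : List (Int × Int)) (d : Int × Int) (v : Int) :
    pvPreds (E ++ [d]) v =
      if d.2 = v then PySem.Set.add (pvPreds E v) d.1 else pvPreds E v := by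
  rw [pvPreds, pvPreds, List.filter_append, List.map_append, PySem.Set.ofList,
    PySem.Set.ofList, List.foldl_append]
  by_cases h : d.2 = v
  · simp [h, List.filter]
  · simp [h]

lemma pvPreds_eq_nil_of_not_mem {E : List (Int × Int)} {v : Int}
    (h : v ∉ pvNodes E) : pvPreds E v = [] := by
  rw [List.eq_nil_iff_forall_not_mem]
  intro u hu
  exact h (edge_snd_mem_nodes ((mem_pvPreds E v u).1 hu))

lemma pvGraphA_spec (deps : List (Int × Int)) :
    (pvGraphA deps).keys = pvNodes deps ∧
    ∀ v, (pvGraphA deps).getD v PySem.Set.empty = pvPreds deps v := by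
  induction deps using List.reverseRecOn with
  | nil => exact ⟨rfl, fun v => rfl⟩
  | append_singleton E d ih =>
    obtain ⟨hkeys, hgetD⟩ := ih
    rw [pvGraphA, List.foldl_append, List.foldl_cons, List.foldl_nil]
    rw [show (List.foldl _ PySem.Dict.empty E) = pvGraphA E from rfl]
    set g0 := pvGraphA E with hg0
    set g1 := if g0.contains d.2 then g0 else g0.insert d.2 PySem.Set.empty with hg1
    set g2 := if g1.contains d.1 then g1 else g1.insert d.1 PySem.Set.empty with hg2
    have h1keys : g1.keys = PySem.Set.add g0.keys d.2 := by
      rw [hg1]; by_cases h : g0.contains d.2 = true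
      · rw [if_pos h, PySem.Set.add_of_mem (by rwa [← PySem.Dict.contains_iff_mem_keys])]
      · rw [if_neg h, PySem.Dict.keys_insert_of_not_contains _ _ (by simpa using h),
          PySem.Set.add_of_not_mem (by rw [← PySem.Dict.contains_iff_mem_keys]; simpa using h)]
    have h1getD : ∀ v, g1.getD v PySem.Set.empty = pvPreds E v := by
      intro v
      rw [hg1]; by_cases h : g0.contains d.2 = true
      · rw [if_pos h]; exact hgetD v
      · rw [if_neg h, PySem.Dict.getD_insert]
        by_cases hv : v = d.2
        · subst hv
          rw [if_pos rfl, pvPreds_eq_nil_of_not_mem (by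
            rw [← hkeys, ← PySem.Dict.contains_iff_mem_keys]; simpa using h)]
          rfl
        · rw [if_neg hv]; exact hgetD v
    have h2keys : g2.keys = PySem.Set.add g1.keys d.1 := by
      rw [hg2]; by_cases h : g1.contains d.1 = true
      · rw [if_pos h, PySem.Set.add_of_mem (by rwa [← PySem.Dict.contains_iff_mem_keys])]
      · rw [if_neg h, PySem.Dict.keys_insert_of_not_contains _ _ (by simpa using h),
          PySem.Set.add_of_not_mem (by rw [← PySem.Dict.contains_iff_mem_keys]; simpa using h)]
    have h2getD : ∀ v, g2.getD v PySem.Set.empty = pvPreds E v := by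
      intro v
      rw [hg2]; by_cases h : g1.contains d.1 = true
      · rw [if_pos h]; exact h1getD v
      · rw [if_neg h, PySem.Dict.getD_insert]
        by_cases hv : v = d.1
        · subst hv
          have hnm : d.1 ∉ pvNodes E := by
            intro hm
            have : g1.contains d.1 = true := by
              rw [PySem.Dict.contains_iff_mem_keys, h1keys, PySem.Set.mem_add]
              exact Or.inl (hkeys ▸ hm)
            simp [this] at h
          rw [if_pos rfl, pvPreds_eq_nil_of_not_mem hnm]
          rfl
        · rw [if_neg hv]; exact h1getD v
    have hd2c : g2.contains d.2 = true := by
      rw [PySem.Dict.contains_iff_mem_keys, h2keys, PySem.Set.mem_add, h1keys,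
        PySem.Set.mem_add]
      exact Or.inl (Or.inr rfl)
    constructor
    · rw [PySem.Dict.keys_modify, PySem.Dict.keys_insert_of_contains _ _ hd2c,
        h2keys, h1keys, hkeys, pvNodes_append]
    · intro v
      rw [PySem.Dict.getD_modify]
      by_cases hv : v = d.2
      · subst hv
        rw [if_pos rfl, h2getD, pvPreds_append, if_pos rfl]
      · rw [if_neg hv, h2getD, pvPreds_append, if_neg (fun h' => hv h'.symm)]
-- ===== A round =====
lemma roundA_fold (deps : List (Int × Int)) (g : PySem.Dict Int (PySem.Set Int))
    (hg : ∀ v, g.getD v PySem.Set.empty = pvPreds deps v) (R0 : List Int) :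
    ∀ (ks : List Int) (T : List Int) (jl : Int), ks.Nodup → (∀ v ∈ ks, v ∉ T) →
      (∀ v ∈ T, v ∉ R0) →
    (ks.foldl (fun st job_id =>
      let ds := g.getD job_id PySem.Set.empty
      if PySem.Set.equal (PySem.Set.diff ds st.2.1) PySem.Set.empty
          && PySem.Set.equal (PySem.Set.inter ds st.2.2) PySem.Set.empty
          && !(PySem.Set.contains st.2.1 job_id)
      then (st.1 - 1, PySem.Set.add st.2.1 job_id, PySem.Set.add st.2.2 job_id)
      else st) (jl, R0 ++ T, T))
    = (jl - ((ks.filter (fun v => !R0.contains v && (pvPreds deps v).all R0.contains)).length : Int),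
       R0 ++ (T ++ ks.filter (fun v => !R0.contains v && (pvPreds deps v).all R0.contains)),
       T ++ ks.filter (fun v => !R0.contains v && (pvPreds deps v).all R0.contains)) := by
  intro ks
  induction ks with
  | nil => intro T jl _ _ _; simp
  | cons v t ih =>
    intro T jl hnd hT hTR
    rw [List.foldl_cons]
    have hvT : v ∉ T := hT v (by simp)
    have hfp : ((!R0.contains v && (pvPreds deps v).all R0.contains) = true)
        ↔ (v ∉ R0 ∧ ∀ u ∈ pvPreds deps v, u ∈ R0) := by
      simp
    have hiff : ((PySem.Set.equal (PySem.Set.diff (g.getD v PySem.Set.empty) (R0 ++ T)) PySem.Set.empty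
          && PySem.Set.equal (PySem.Set.inter (g.getD v PySem.Set.empty) T) PySem.Set.empty
          && !(PySem.Set.contains (R0 ++ T) v)) = true)
        ↔ (v ∉ R0 ∧ ∀ u ∈ pvPreds deps v, u ∈ R0) := by
      rw [hg v]
      simp only [Bool.and_eq_true, Bool.not_eq_true']
      have e1 : (PySem.Set.equal (PySem.Set.diff (pvPreds deps v) (R0 ++ T)) PySem.Set.empty = true)
          ↔ ∀ u ∈ pvPreds deps v, u ∈ R0 ∨ u ∈ T := by
        simp [pysem]
        constructor
        · intro h u hu; by_cases hR : u ∈ R0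
          · exact Or.inl hR
          · exact Or.inr (h u hu hR)
        · intro h u hu hR; exact (h u hu).resolve_left hR
      have e2 : (PySem.Set.equal (PySem.Set.inter (pvPreds deps v) T) PySem.Set.empty = true)
          ↔ ∀ u ∈ pvPreds deps v, u ∉ T := by simp [pysem]
      have e3 : (PySem.Set.contains (R0 ++ T) v = false) ↔ v ∉ R0 ++ T := by
        simp [pysem]
      rw [e1, e2, e3]
      constructor
      · rintro ⟨⟨hsub, hdisj⟩, hnm⟩
        refine ⟨fun hm => hnm (List.mem_append.mpr (Or.inl hm)), fun u hu => ?_⟩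
        rcases hsub u hu with h | h
        · exact h
        · exact absurd h (hdisj u hu)
      · rintro ⟨hnR, hsub⟩
        exact ⟨⟨fun u hu => Or.inl (hsub u hu),
          fun u hu hut => hTR u hut (hsub u hu)⟩,
          fun hm => (List.mem_append.mp hm).elim hnR hvT⟩
    by_cases hc : v ∉ R0 ∧ ∀ u ∈ pvPreds deps v, u ∈ R0
    · rw [if_pos (hiff.mpr hc)]
      have hvR0T : v ∉ R0 ++ T := fun hm => (List.mem_append.mp hm).elim hc.1 hvT
      have hadd1 : PySem.Set.add (R0 ++ T) v = R0 ++ (T ++ [v]) := by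
        rw [PySem.Set.add_of_not_mem hvR0T, List.append_assoc]
      have hadd2 : PySem.Set.add T v = T ++ [v] := PySem.Set.add_of_not_mem hvT
      rw [hadd1, hadd2]
      rw [ih (T ++ [v]) (jl - 1) (List.nodup_cons.mp hnd).2
        (fun w hw => by
          simp only [List.mem_append, List.mem_singleton, not_or]
          exact ⟨hT w (List.mem_cons_of_mem _ hw), fun h => (List.nodup_cons.mp hnd).1 (h ▸ hw)⟩)
        (fun w hw => by
          rcases List.mem_append.mp hw with h | h
          · exact hTR w h
          · rw [List.mem_singleton.mp h]; exact hc.1)]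
      rw [List.filter_cons, if_pos (hfp.mpr hc)]
      simp only [Prod.mk.injEq]
      refine ⟨by simp only [List.length_cons]; push_cast; ring, by simp, by simp⟩
    · rw [if_neg (by rw [hiff]; exact hc)]
      rw [ih T jl (List.nodup_cons.mp hnd).2 (fun w hw => hT w (List.mem_cons_of_mem _ hw)) hTR]
      rw [List.filter_cons, if_neg (fun h => hc (hfp.mp h))]

lemma minSprintRound_def (g : PySem.Dict Int (PySem.Set Int)) (st : Int × PySem.Set Int × PySem.Set Int) :
    minSprintRound g st = g.keys.foldl (fun st job_id =>
      let ds := g.getD job_id PySem.Set.empty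
      if PySem.Set.equal (PySem.Set.diff ds st.2.1) PySem.Set.empty
          && PySem.Set.equal (PySem.Set.inter ds st.2.2) PySem.Set.empty
          && !(PySem.Set.contains st.2.1 job_id)
      then (st.1 - 1, PySem.Set.add st.2.1 job_id, PySem.Set.add st.2.2 job_id)
      else st) st := rfl

lemma roundA (deps : List (Int × Int)) (jl : Int) (k : Nat) :
    minSprintRound (pvGraphA deps) (jl, pvD deps k, PySem.Set.empty) =
      (jl - ((pvNew deps (pvD deps k)).length : Int), pvD deps (k + 1), pvNew deps (pvD deps k)) := by
  obtain ⟨hkeys, hgetD⟩ := pvGraphA_spec deps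
  have h := roundA_fold deps (pvGraphA deps) hgetD (pvD deps k) (pvNodes deps) [] jl
    (nodup_pvNodes deps) (by simp) (by simp)
  rw [List.append_nil] at h
  rw [minSprintRound_def, hkeys, pvD_succ]
  exact h
-- ===== A loop =====
lemma loopA (deps : List (Int × Int)) (n : Int) (K : Nat)
    (hK : n ≤ ((pvD deps K).length : Int))
    (hmin : ∀ j < K, ¬ (n ≤ ((pvD deps j).length : Int))) :
    ∀ fuel k, k ≤ K → K - k < fuel →
      minSprintLoop (pvGraphA deps) fuel (n - ((pvD deps k).length : Int)) (pvD deps k) (k : Int)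
        = (K : Int) := by
  intro fuel
  induction fuel with
  | zero => intro k _ h; omega
  | succ fuel ih =>
    intro k hk hfuel
    rw [minSprintLoop]
    by_cases hstop : n - ((pvD deps k).length : Int) > 0
    · rw [if_pos hstop]
      have hkK : k < K := by
        rcases Nat.lt_or_ge k K with h | h
        · exact h
        · exfalso; have : k = K := le_antisymm hk h
          subst this; omega
      simp only [roundA deps]
      have harith : n - ((pvD deps k).length : Int) - ((pvNew deps (pvD deps k)).length : Int)
          = n - ((pvD deps (k+1)).length : Int) := by
        rw [length_pvD_succ]; push_cast; ring
      have hcast : ((k : Int) + 1) = (((k+1 : Nat)) : Int) := by push_cast; ring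
      rw [harith, hcast]
      exact ih (k+1) hkK (by omega)
    · rw [if_neg hstop]
      have hn : n ≤ ((pvD deps k).length : Int) := by omega
      have : K ≤ k := by
        by_contra hcon
        exact (hmin k (by omega)) hn
      have : k = K := le_antisymm hk this
      rw [this]

-- A's value: the first sprint count k with n ≤ |pvD k| (when n ≠ 1 and such k exists)
lemma minSprint_char (deps : List (Int × Int)) (n : Int) (hne : ¬ (n == 1) = true)
    (K : Nat) (hK : n ≤ ((pvD deps K).length : Int))
    (hmin : ∀ j < K, ¬ (n ≤ ((pvD deps j).length : Int)))
    (hKle : K ≤ 2 * deps.length + 1) :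
    minSprint n deps = (K : Int) := by
  rw [minSprint_eq, if_neg hne]
  have h := loopA deps n K hK hmin (2 * deps.length + 2) 0 (by omega) (by omega)
  simpa using h
-- ===== B build =====
def pvSuccs (deps : List (Int × Int)) (u : Int) : List Int :=
  ((PySem.List.dedup deps).filter (fun d => d.1 == u)).map (·.2)

lemma ofList_append_singleton {α : Type} [BEq α] (E : List α) (d : α) :
    PySem.Set.ofList (E ++ [d]) = PySem.Set.add (PySem.Set.ofList E) d := by
  rw [PySem.Set.ofList_eq_foldl, PySem.Set.ofList_eq_foldl, List.foldl_append]; rfl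

lemma dedup_append_singleton (E : List (Int × Int)) (d : Int × Int) :
    PySem.List.dedup (E ++ [d]) =
      if d ∈ E then PySem.List.dedup E else PySem.List.dedup E ++ [d] := by
  rw [PySem.List.dedup_eq_ofList, PySem.List.dedup_eq_ofList, ofList_append_singleton]
  by_cases h : d ∈ E
  · rw [if_pos h, PySem.Set.add_of_mem (by rwa [PySem.Set.mem_ofList])]
  · rw [if_neg h, PySem.Set.add_of_not_mem (by rwa [PySem.Set.mem_ofList])]

lemma pvSuccs_append_fresh {E : List (Int × Int)} {d : Int × Int} (h : d ∉ E) (u : Int) :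
    pvSuccs (E ++ [d]) u = if d.1 = u then pvSuccs E u ++ [d.2] else pvSuccs E u := by
  rw [pvSuccs, pvSuccs, dedup_append_singleton, if_neg h, List.filter_append, List.map_append]
  by_cases hu : d.1 = u
  · rw [if_pos hu]; simp [hu]
  · rw [if_neg hu]; simp [hu]

lemma pvSuccs_append_stale {E : List (Int × Int)} {d : Int × Int} (h : d ∈ E) (u : Int) :
    pvSuccs (E ++ [d]) u = pvSuccs E u := by
  rw [pvSuccs, pvSuccs, dedup_append_singleton, if_pos h]

lemma length_pvPreds_append_fresh {E : List (Int × Int)} {d : Int × Int} (h : d ∉ E) (v : Int) :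
    (pvPreds (E ++ [d]) v).length =
      if d.2 = v then (pvPreds E v).length + 1 else (pvPreds E v).length := by
  rw [pvPreds_append]
  by_cases hv : d.2 = v
  · rw [if_pos hv, if_pos hv, PySem.Set.add_of_not_mem (fun hm => h (by
      have := (mem_pvPreds E v d.1).1 hm
      rwa [← hv] at this)), List.length_append, List.length_cons, List.length_nil]
  · rw [if_neg hv, if_neg hv]

lemma length_pvPreds_append_stale {E : List (Int × Int)} {d : Int × Int} (h : d ∈ E) (v : Int) :
    (pvPreds (E ++ [d]) v).length = (pvPreds E v).length := by
  rw [pvPreds_append]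
  by_cases hv : d.2 = v
  · rw [if_pos hv, PySem.Set.add_of_mem (by
      rw [mem_pvPreds, ← hv]; exact h)]
  · rw [if_neg hv]

lemma pvBuildB_spec (deps : List (Int × Int)) :
    (minSprintAltBuild deps).2.2 = PySem.Set.ofList deps ∧
    (minSprintAltBuild deps).1.keys = pvNodes deps ∧
    (∀ v, (minSprintAltBuild deps).1.getD v 0 = ((pvPreds deps v).length : Int)) ∧
    (∀ u, (minSprintAltBuild deps).2.1.getD u [] = pvSuccs deps u) := by
  induction deps using List.reverseRecOn with
  | nil => exact ⟨rfl, rfl, fun v => rfl, fun u => rfl⟩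
  | append_singleton E d ih =>
    obtain ⟨hedges, hkeys, hindeg, hout⟩ := ih
    rw [minSprintAltBuild, List.foldl_append, List.foldl_cons, List.foldl_nil]
    rw [show (List.foldl _ (PySem.Dict.empty, PySem.Dict.empty, PySem.Set.empty) E) = minSprintAltBuild E from rfl]
    set st := minSprintAltBuild E with hst
    set i1 := if st.1.contains d.2 then st.1 else st.1.insert d.2 0 with hi1
    set i2 := if i1.contains d.1 then i1 else i1.insert d.1 0 with hi2
    have h1keys : i1.keys = PySem.Set.add st.1.keys d.2 := by
      rw [hi1]; by_cases h : st.1.contains d.2 = true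
      · rw [if_pos h, PySem.Set.add_of_mem (by rwa [← PySem.Dict.contains_iff_mem_keys])]
      · rw [if_neg h, PySem.Dict.keys_insert_of_not_contains _ _ (by simpa using h),
          PySem.Set.add_of_not_mem (by rw [← PySem.Dict.contains_iff_mem_keys]; simpa using h)]
    have h1getD : ∀ v, i1.getD v 0 = ((pvPreds E v).length : Int) := by
      intro v
      rw [hi1]; by_cases h : st.1.contains d.2 = true
      · rw [if_pos h]; exact hindeg v
      · rw [if_neg h, PySem.Dict.getD_insert]
        by_cases hv : v = d.2
        · subst hv
          rw [if_pos rfl, pvPreds_eq_nil_of_not_mem (by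
            rw [← hkeys, ← PySem.Dict.contains_iff_mem_keys]; simpa using h)]
          rfl
        · rw [if_neg hv]; exact hindeg v
    have h2keys : i2.keys = PySem.Set.add i1.keys d.1 := by
      rw [hi2]; by_cases h : i1.contains d.1 = true
      · rw [if_pos h, PySem.Set.add_of_mem (by rwa [← PySem.Dict.contains_iff_mem_keys])]
      · rw [if_neg h, PySem.Dict.keys_insert_of_not_contains _ _ (by simpa using h),
          PySem.Set.add_of_not_mem (by rw [← PySem.Dict.contains_iff_mem_keys]; simpa using h)]
    have h2getD : ∀ v, i2.getD v 0 = ((pvPreds E v).length : Int) := by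
      intro v
      rw [hi2]; by_cases h : i1.contains d.1 = true
      · rw [if_pos h]; exact h1getD v
      · rw [if_neg h, PySem.Dict.getD_insert]
        by_cases hv : v = d.1
        · subst hv
          have hnm : d.1 ∉ pvNodes E := by
            intro hm
            have hct : i1.contains d.1 = true := by
              rw [PySem.Dict.contains_iff_mem_keys, h1keys, PySem.Set.mem_add]
              exact Or.inl (hkeys ▸ hm)
            simp [hct] at h
          rw [if_pos rfl, pvPreds_eq_nil_of_not_mem hnm]
          rfl
        · rw [if_neg hv]; exact h1getD v
    have hd2c : i2.contains d.2 = true := by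
      rw [PySem.Dict.contains_iff_mem_keys, h2keys, PySem.Set.mem_add, h1keys,
        PySem.Set.mem_add]
      exact Or.inl (Or.inr rfl)
    by_cases hd : d ∈ E
    · have hc : PySem.Set.contains st.2.2 d = true := by
        rw [hedges]; simp [pysem, hd]
      rw [if_pos hc]
      refine ⟨by rw [hedges, ofList_append_singleton,
          PySem.Set.add_of_mem (by rwa [PySem.Set.mem_ofList])], ?_, ?_, ?_⟩
      · rw [h2keys, h1keys, hkeys, pvNodes_append]
      · intro v
        rw [h2getD v, length_pvPreds_append_stale hd]
      · intro u
        rw [hout u, pvSuccs_append_stale hd]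
    · have hc : PySem.Set.contains st.2.2 d = false := by
        rw [hedges]; simp [pysem, hd]
      rw [if_neg (by rw [hc]; exact Bool.false_ne_true)]
      refine ⟨?_, ?_, ?_, ?_⟩
      · rw [hedges, ofList_append_singleton]
      · rw [PySem.Dict.keys_modify, PySem.Dict.keys_insert_of_contains _ _ hd2c,
          h2keys, h1keys, hkeys, pvNodes_append]
      · intro v
        rw [PySem.Dict.getD_modify, length_pvPreds_append_fresh hd]
        by_cases hv : v = d.2
        · subst hv
          rw [if_pos rfl, h2getD, if_pos rfl]
          push_cast; ring
        · rw [if_neg hv, h2getD v, if_neg (fun h' => hv h'.symm)]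
      · intro u
        rw [PySem.Dict.getD_modify, pvSuccs_append_fresh hd]
        by_cases hu : u = d.1
        · subst hu
          rw [if_pos rfl, hout, if_pos rfl]
        · rw [if_neg hu, hout u, if_neg (fun h' => hu h'.symm)]
-- ===== counting helpers =====
lemma nodup_pvSuccs (deps : List (Int × Int)) (u : Int) : (pvSuccs deps u).Nodup := by
  refine List.Nodup.map_on ?_ (List.Nodup.filter _ (by
    rw [PySem.List.dedup_eq_ofList]; exact PySem.Set.nodup_ofList _))
  intro d1 h1 d2 h2 he
  have e1 : d1.1 = u := by simpa using (List.mem_filter.mp h1).2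
  have e2 : d2.1 = u := by simpa using (List.mem_filter.mp h2).2
  exact Prod.ext (e1.trans e2.symm) he

lemma mem_pvSuccs (deps : List (Int × Int)) (u v : Int) :
    v ∈ pvSuccs deps u ↔ (u, v) ∈ deps := by
  rw [pvSuccs]
  constructor
  · intro h
    simp only [List.mem_map, List.mem_filter] at h
    obtain ⟨d, ⟨hd, hdu⟩, rfl⟩ := h
    have : d.1 = u := by simpa using hdu
    rw [← this]
    have := hd
    rw [PySem.List.dedup_eq_ofList, PySem.Set.mem_ofList] at this
    exact this
  · intro h
    simp only [List.mem_map, List.mem_filter]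
    exact ⟨(u, v), ⟨by rw [PySem.List.dedup_eq_ofList, PySem.Set.mem_ofList]; exact h, by simp⟩, rfl⟩

lemma count_pvSuccs (deps : List (Int × Int)) (u v : Int) :
    (pvSuccs deps u).count v = if (u, v) ∈ deps then 1 else 0 := by
  by_cases h : (u, v) ∈ deps
  · rw [if_pos h]
    have hle : (pvSuccs deps u).count v ≤ 1 := by
      have := nodup_pvSuccs deps u
      rw [List.nodup_iff_count_le_one] at this; exact this v
    have hpos : 0 < (pvSuccs deps u).count v :=
      List.count_pos_iff.mpr ((mem_pvSuccs deps u v).mpr h)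
    omega
  · rw [if_neg h, List.count_eq_zero]
    exact fun hm => h ((mem_pvSuccs deps u v).1 hm)

lemma count_flatMap_int (l : List Int) (g : Int → List Int) (v : Int) :
    (l.flatMap g).count v = (l.map (fun u => (g u).count v)).sum := by
  induction l with
  | nil => rfl
  | cons x t ih => simp [List.flatMap_cons, List.count_append, ih]

lemma sum_map_ite_one_zero_nat (l : List Int) (p : Int → Prop) [DecidablePred p] :
    (l.map (fun u => if p u then 1 else 0)).sum = l.countP (fun u => decide (p u)) := by
  induction l with
  | nil => rfl
  | cons x t ih =>
    rw [List.map_cons, List.sum_cons, List.countP_cons, ih]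
    by_cases h : p x
    · simp [h]; omega
    · simp [h]

lemma countP_split (l : List Int) (p q r : Int → Bool)
    (h : ∀ x ∈ l, (p x = true ↔ (q x = true ∨ r x = true)) ∧ ¬(q x = true ∧ r x = true)) :
    l.countP p = l.countP q + l.countP r := by
  induction l with
  | nil => rfl
  | cons x t ih =>
    have hx := h x (by simp)
    rw [List.countP_cons, List.countP_cons, List.countP_cons,
      ih (fun y hy => h y (List.mem_cons_of_mem _ hy))]
    rcases Bool.eq_false_or_eq_true (q x) with hq | hq <;>
      rcases Bool.eq_false_or_eq_true (r x) with hr | hr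
    · exact absurd ⟨hq, hr⟩ hx.2
    · have hp : p x = true := hx.1.mpr (Or.inl hq)
      simp [hp, hq, hr]; omega
    · have hp : p x = true := hx.1.mpr (Or.inr hr)
      simp [hp, hq, hr]; omega
    · have hp : p x = false := by
        rcases Bool.eq_false_or_eq_true (p x) with h' | h'
        · rcases hx.1.mp h' with h'' | h'' <;> simp_all
        · exact h'
      simp [hp, hq, hr]
  
lemma countP_mem_comm {l1 l2 : List Int} (h1 : l1.Nodup) (h2 : l2.Nodup) :
    l1.countP (fun x => decide (x ∈ l2)) = l2.countP (fun x => decide (x ∈ l1)) := by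
  rw [List.countP_eq_length_filter, List.countP_eq_length_filter]
  exact pvLenEq (List.Nodup.filter _ h1) (List.Nodup.filter _ h2)
    (fun x => by simp only [List.mem_filter, decide_eq_true_eq]; tauto)
-- ===== B round: decrement fold =====
lemma decFoldB (init : Int → Nat) :
    ∀ (L : List Int) (indeg : PySem.Dict Int Int) (nxt : List Int) (c : Int → Nat),
    (∀ v, c v + L.count v ≤ init v) →
    (∀ v, indeg.getD v 0 = (init v : Int) - (c v : Int)) →
    nxt.Nodup →
    (∀ v, v ∈ nxt ↔ (c v = init v ∧ 0 < c v)) →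
    (∀ v, (L.foldl (fun st v =>
        let indeg := st.1.modify v 0 (· - 1)
        if indeg.getD v 0 == 0 then (indeg, st.2 ++ [v]) else (indeg, st.2))
        (indeg, nxt)).1.getD v 0 = (init v : Int) - ((c v + L.count v : Nat) : Int)) ∧
    (L.foldl (fun st v =>
        let indeg := st.1.modify v 0 (· - 1)
        if indeg.getD v 0 == 0 then (indeg, st.2 ++ [v]) else (indeg, st.2))
        (indeg, nxt)).2.Nodup ∧
    (∀ v, v ∈ (L.foldl (fun st v =>
        let indeg := st.1.modify v 0 (· - 1)
        if indeg.getD v 0 == 0 then (indeg, st.2 ++ [v]) else (indeg, st.2))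
        (indeg, nxt)).2 ↔ (c v + L.count v = init v ∧ 0 < c v + L.count v)) := by
  intro L
  induction L with
  | nil =>
    intro indeg nxt c hbound hindeg hnd hmem
    refine ⟨fun v => by simpa using hindeg v, hnd, fun v => by simpa using hmem v⟩
  | cons v0 t ih =>
    intro indeg nxt c hbound hindeg hnd hmem
    have hb0 : c v0 + 1 + t.count v0 ≤ init v0 := by
      have := hbound v0
      rw [List.count_cons_self] at this
      omega
    have hgd : (indeg.modify v0 0 (· - 1)).getD v0 0 = (init v0 : Int) - (c v0 : Int) - 1 := by
      rw [PySem.Dict.getD_modify_self, hindeg v0]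
    have hindeg1 : ∀ v, (indeg.modify v0 0 (· - 1)).getD v 0 =
        (init v : Int) - ((if v = v0 then c v + 1 else c v : Nat) : Int) := by
      intro v
      rw [PySem.Dict.getD_modify]
      by_cases hv : v = v0
      · subst hv; rw [if_pos rfl, if_pos rfl, hindeg v]; push_cast; ring
      · rw [if_neg hv, if_neg hv, hindeg v]
    have hshift : ∀ v, (if v = v0 then c v + 1 else c v) + t.count v = c v + (v0 :: t).count v := by
      intro v
      by_cases hv : v = v0
      · subst hv; rw [if_pos rfl, List.count_cons_self]; omega
      · rw [if_neg hv, List.count_cons_of_ne (fun h => hv h.symm)]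
    have hbound' : ∀ v, (if v = v0 then c v + 1 else c v) + t.count v ≤ init v := by
      intro v; rw [hshift v]; exact hbound v
    rw [List.foldl_cons]
    by_cases heq : (init v0 : Int) - (c v0 : Int) - 1 = 0
    · have hbeq : ((indeg.modify v0 0 (· - 1)).getD v0 0 == 0) = true := by
        rw [hgd]; exact beq_iff_eq.mpr heq
      simp only [hbeq, if_true]
      have hv0nxt : v0 ∉ nxt := by
        rw [hmem v0]; rintro ⟨h1, _⟩; omega
      have hnd' : (nxt ++ [v0]).Nodup := by
        simp only [List.nodup_append, List.nodup_singleton, true_and]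
        refine ⟨hnd, fun a ha b hb => ?_⟩
        rw [List.mem_singleton] at hb
        subst hb
        exact fun hab => hv0nxt (hab ▸ ha)
      have hmem' : ∀ v, v ∈ nxt ++ [v0] ↔
          ((if v = v0 then c v + 1 else c v) = init v ∧ 0 < (if v = v0 then c v + 1 else c v)) := by
        intro v
        rw [List.mem_append, List.mem_singleton]
        by_cases hv : v = v0
        · subst hv
          rw [if_pos rfl]
          constructor
          · intro _; constructor <;> omega
          · intro _; exact Or.inr rfl
        · rw [if_neg hv, hmem v]
          constructor
          · rintro (h | h)
            · exact h
            · exact absurd h hv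
          · intro h; exact Or.inl h
      obtain ⟨r1, r2, r3⟩ := ih (indeg.modify v0 0 (· - 1)) (nxt ++ [v0]) _
        hbound' hindeg1 hnd' hmem'
      exact ⟨fun v => by rw [r1 v, hshift v], r2, fun v => by rw [r3 v, hshift v]⟩
    · have hbeq : ((indeg.modify v0 0 (· - 1)).getD v0 0 == 0) = false := by
        rw [hgd]; exact beq_eq_false_iff_ne.mpr heq
      simp only [hbeq, Bool.false_eq_true, if_false]
      have hmem' : ∀ v, v ∈ nxt ↔
          ((if v = v0 then c v + 1 else c v) = init v ∧ 0 < (if v = v0 then c v + 1 else c v)) := by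
        intro v
        by_cases hv : v = v0
        · subst hv
          rw [if_pos rfl, hmem v]
          constructor
          · rintro ⟨h1, _⟩; omega
          · rintro ⟨h1, _⟩; exfalso; apply heq; omega
        · rw [if_neg hv, hmem v]
      obtain ⟨r1, r2, r3⟩ := ih (indeg.modify v0 0 (· - 1)) nxt _
        hbound' hindeg1 hnd hmem'
      exact ⟨fun v => by rw [r1 v, hshift v], r2, fun v => by rw [r3 v, hshift v]⟩
-- ===== B round =====
def pvRem (deps : List (Int × Int)) (i : Nat) (v : Int) : Nat :=
  (pvPreds deps v).countP (fun u => !(pvD deps i).contains u)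

lemma pvRem_split (deps : List (Int × Int)) (i : Nat) (frontier : List Int)
    (hfmem : ∀ v, v ∈ frontier ↔ v ∈ pvD deps (i+1) ∧ v ∉ pvD deps i) (v : Int) :
    pvRem deps i v = pvRem deps (i+1) v +
      (pvPreds deps v).countP (fun u => decide (u ∈ frontier)) := by
  refine countP_split _ _ _ _ (fun u _ => ?_)
  constructor
  · simp only [Bool.not_eq_true', ← Bool.not_eq_true, List.contains_iff_mem,
      decide_eq_true_eq, hfmem u]
    constructor
    · intro hu
      by_cases h1 : u ∈ pvD deps (i+1)
      · exact Or.inr ⟨h1, hu⟩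
      · exact Or.inl h1
    · rintro (h | ⟨_, h⟩)
      · exact fun hm => h (pvD_mono (Nat.le_succ i) hm)
      · exact h
  · rintro ⟨hq, hr⟩
    simp only [Bool.not_eq_true', ← Bool.not_eq_true, List.contains_iff_mem,
      decide_eq_true_eq, hfmem u] at hq hr
    exact hq hr.1

lemma roundB (deps : List (Int × Int)) (out : PySem.Dict Int (List Int))
    (indeg : PySem.Dict Int Int) (i : Nat) (frontier : List Int)
    (hout : ∀ u, out.getD u [] = pvSuccs deps u)
    (hindeg : ∀ v, indeg.getD v 0 = (pvRem deps i v : Int))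
    (hfnd : frontier.Nodup)
    (hfmem : ∀ v, v ∈ frontier ↔ v ∈ pvD deps (i+1) ∧ v ∉ pvD deps i) :
    (∀ v, (minSprintAltRound out (indeg, []) frontier).1.getD v 0 = (pvRem deps (i+1) v : Int)) ∧
    (minSprintAltRound out (indeg, []) frontier).2.Nodup ∧
    (∀ v, v ∈ (minSprintAltRound out (indeg, []) frontier).2 ↔
      v ∈ pvD deps (i+2) ∧ v ∉ pvD deps (i+1)) := by
  have e0 : minSprintAltRound out (indeg, []) frontier
      = (frontier.flatMap (fun u => pvSuccs deps u)).foldl (fun st v =>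
          let indeg := st.1.modify v 0 (· - 1)
          if indeg.getD v 0 == 0 then (indeg, st.2 ++ [v]) else (indeg, st.2)) (indeg, []) := by
    rw [minSprintAltRound, List.foldl_flatMap]
    refine PySem.List.foldl_congr_mem _ _ _ _ (fun acc u hu => ?_)
    rw [hout u]
  set L := frontier.flatMap (fun u => pvSuccs deps u) with hL
  have hcount : ∀ v, L.count v = (pvPreds deps v).countP (fun u => decide (u ∈ frontier)) := by
    intro v
    rw [hL, count_flatMap_int]
    have e1 : frontier.map (fun u => (pvSuccs deps u).count v)
        = frontier.map (fun u => if (u, v) ∈ deps then 1 else 0) := by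
      exact List.map_congr_left (fun u _ => count_pvSuccs deps u v)
    rw [e1, sum_map_ite_one_zero_nat]
    have e2 : frontier.countP (fun u => decide ((u, v) ∈ deps))
        = frontier.countP (fun u => decide (u ∈ pvPreds deps v)) :=
      List.countP_congr (fun u _ => by simp [mem_pvPreds])
    rw [e2, countP_mem_comm hfnd (nodup_pvPreds deps v)]
  have hpart := pvRem_split deps i frontier hfmem
  obtain ⟨r1, r2, r3⟩ := decFoldB (pvRem deps i) L indeg [] (fun _ => 0)
    (fun v => by simp only [hcount v]; have := hpart v; omega)
    (fun v => by simp only [hindeg v]; push_cast; ring)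
    List.nodup_nil
    (fun v => by simp)
  rw [e0]
  refine ⟨fun v => ?_, r2, fun v => ?_⟩
  · rw [r1 v]
    have hp2 := hpart v
    simp only [hcount v]
    push_cast
    omega
  · rw [r3 v]
    simp only [hcount v, Nat.zero_add]
    have hp := hpart v
    have hA : ((pvPreds deps v).countP (fun u => decide (u ∈ frontier)) = pvRem deps i v ∧
        0 < (pvPreds deps v).countP (fun u => decide (u ∈ frontier)))
        ↔ (pvRem deps (i+1) v = 0 ∧ 0 < pvRem deps i v) := by omega
    rw [hA]
    have hzero : pvRem deps (i+1) v = 0 ↔ ∀ u ∈ pvPreds deps v, u ∈ pvD deps (i+1) := by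
      rw [pvRem, List.countP_eq_zero]
      simp [List.contains_iff_mem]
    have hpos : 0 < pvRem deps i v ↔ ∃ u ∈ pvPreds deps v, u ∉ pvD deps i := by
      rw [pvRem, List.countP_pos_iff]
      simp [List.contains_iff_mem]
    rw [hzero, hpos]
    constructor
    · rintro ⟨hsub, u, hu, hunotin⟩
      have hvns : v ∈ pvNodes deps := edge_snd_mem_nodes ((mem_pvPreds deps v u).1 hu)
      have hvD2 : v ∈ pvD deps (i+2) := (mem_pvD_succ v).2 (Or.inr ⟨hvns, hsub⟩)
      refine ⟨hvD2, fun hvD1 => ?_⟩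
      exact hunotin (pvPreds_sub_of_mem hvD1 u hu)
    · rintro ⟨hvD2, hvnotD1⟩
      refine ⟨pvPreds_sub_of_mem hvD2, ?_⟩
      by_contra hcon
      push Not at hcon
      exact hvnotD1 ((mem_pvD_succ v).2 (Or.inr ⟨pvD_subset_nodes hvD2, hcon⟩))
-- ===== B loop and assembly =====
lemma frontier_length (deps : List (Int × Int)) (i : Nat) (frontier : List Int)
    (hfnd : frontier.Nodup)
    (hfmem : ∀ v, v ∈ frontier ↔ v ∈ pvD deps (i+1) ∧ v ∉ pvD deps i) :
    frontier.length = (pvNew deps (pvD deps i)).length := by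
  refine pvLenEq hfnd ((nodup_pvNodes deps).filter _) (fun v => ?_)
  rw [hfmem v, mem_pvNew]
  constructor
  · rintro ⟨h1, h2⟩
    rcases (mem_pvD_succ v).1 h1 with h | h
    · exact absurd h h2
    · exact ⟨h.1, h2, h.2⟩
  · rintro ⟨h1, h2, h3⟩
    exact ⟨(mem_pvD_succ v).2 (Or.inr ⟨h1, h3⟩), h2⟩

lemma loopB (deps : List (Int × Int)) (out : PySem.Dict Int (List Int))
    (hout : ∀ u, out.getD u [] = pvSuccs deps u) (n : Int) (K : Nat)
    (hK : n ≤ ((pvD deps K).length : Int))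
    (hmin : ∀ j < K, ¬ (n ≤ ((pvD deps j).length : Int))) :
    ∀ fuel (i : Nat) (indeg : PySem.Dict Int Int) (frontier : List Int), i ≤ K → K - i < fuel →
    (∀ v, indeg.getD v 0 = (pvRem deps i v : Int)) →
    frontier.Nodup →
    (∀ v, v ∈ frontier ↔ v ∈ pvD deps (i+1) ∧ v ∉ pvD deps i) →
    minSprintAltLoop out fuel indeg frontier n ((pvD deps i).length : Int) (i : Int) = (K : Int) := by
  intro fuel
  induction fuel with
  | zero => intro i _ _ _ h; omega
  | succ fuel ih =>
    intro i indeg frontier hi hfuel hindeg hfnd hfmem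
    rw [minSprintAltLoop]
    by_cases hstop : ((pvD deps i).length : Int) < n
    · rw [if_pos hstop]
      have hiK : i < K := by
        rcases Nat.lt_or_ge i K with h | h
        · exact h
        · exfalso; have : i = K := le_antisymm hi h
          subst this; omega
      obtain ⟨r1, r2, r3⟩ := roundB deps out indeg i frontier hout hindeg hfnd hfmem
      have hfin : ((pvD deps i).length : Int) + (frontier.length : Int)
          = ((pvD deps (i+1)).length : Int) := by
        rw [frontier_length deps i frontier hfnd hfmem, length_pvD_succ]
        push_cast; ring
      have hcast : ((i : Int) + 1) = (((i+1 : Nat)) : Int) := by push_cast; ring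
      rw [hfin, hcast]
      exact ih (i+1) _ _ hiK (by omega) r1 r2 (fun v => r3 v)
    · rw [if_neg hstop]
      have hn : n ≤ ((pvD deps i).length : Int) := by omega
      have : K ≤ i := by
        by_contra hcon
        exact (hmin i (by omega)) hn
      have : i = K := le_antisymm hi this
      rw [this]

lemma minSprint_alt_eq (n : Int) (deps : List (Int × Int)) :
    minSprint_alt n deps = if n == 1 then 1
      else minSprintAltLoop (minSprintAltBuild deps).2.1 (2 * deps.length + 2)
        (minSprintAltBuild deps).1
        ((minSprintAltBuild deps).1.keys.filter
          (fun v => (minSprintAltBuild deps).1.getD v 0 == 0)) n 0 0 := rfl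

lemma pvRem_zero (deps : List (Int × Int)) (v : Int) :
    pvRem deps 0 v = (pvPreds deps v).length := by
  rw [pvRem]
  have : ∀ u ∈ pvPreds deps v, (!(pvD deps 0).contains u) = true := by
    intro u _
    rw [pvD_zero]
    rfl
  rw [List.countP_eq_length.mpr this]

lemma minSprint_alt_char (deps : List (Int × Int)) (n : Int) (hne : ¬ (n == 1) = true)
    (K : Nat) (hK : n ≤ ((pvD deps K).length : Int))
    (hmin : ∀ j < K, ¬ (n ≤ ((pvD deps j).length : Int)))
    (hKle : K ≤ 2 * deps.length + 1) :
    minSprint_alt n deps = (K : Int) := by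
  obtain ⟨hedges, hkeys, hindeg, hout⟩ := pvBuildB_spec deps
  rw [minSprint_alt_eq, if_neg hne, hkeys]
  have hindeg0 : ∀ v, (minSprintAltBuild deps).1.getD v 0 = (pvRem deps 0 v : Int) := by
    intro v; rw [hindeg v, pvRem_zero]
  have hfmem0 : ∀ v, v ∈ (pvNodes deps).filter
      (fun v => (minSprintAltBuild deps).1.getD v 0 == 0) ↔
      v ∈ pvD deps 1 ∧ v ∉ pvD deps 0 := by
    intro v
    rw [List.mem_filter]
    have e1 : ((minSprintAltBuild deps).1.getD v 0 == 0) = true ↔ pvPreds deps v = [] := by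
      rw [hindeg v]
      rw [beq_iff_eq]
      constructor
      · intro h
        have : (pvPreds deps v).length = 0 := by exact_mod_cast h
        exact List.length_eq_zero_iff.mp this
      · intro h; rw [h]; rfl
    rw [e1]
    constructor
    · rintro ⟨h1, h2⟩
      refine ⟨(mem_pvD_succ v).2 (Or.inr ⟨h1, by rw [h2]; intro u hu; exact absurd hu (List.not_mem_nil)⟩), ?_⟩
      rw [pvD_zero]; exact List.not_mem_nil
    · rintro ⟨h1, _⟩
      rcases (mem_pvD_succ v).1 h1 with h | h
      · rw [pvD_zero] at h; exact absurd h List.not_mem_nil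
      · refine ⟨h.1, List.eq_nil_iff_forall_not_mem.mpr (fun u hu => ?_)⟩
        have := h.2 u hu
        rw [pvD_zero] at this
        exact List.not_mem_nil this
  have h := loopB deps (minSprintAltBuild deps).2.1 hout n K hK hmin
    (2 * deps.length + 2) 0 (minSprintAltBuild deps).1
    ((pvNodes deps).filter (fun v => (minSprintAltBuild deps).1.getD v 0 == 0))
    (by omega) (by omega) hindeg0 ((nodup_pvNodes deps).filter _) hfmem0
  simpa using h

-- ===== VERDICT (by name: the statement is the Claim_ definition above) =====
theorem minSprint_spec : Claim_equal_minSprint := by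
  intro n deps hdom hpre
  unfold Spec_minSprint
  by_cases hn : (n == 1) = true
  · rw [minSprint_eq, minSprint_alt_eq, if_pos hn, if_pos hn]
  · have hne : n ≠ 1 := by simpa using hn
    have hex : ∃ k, n ≤ ((pvD deps k).length : Int) := by
      rcases hpre with h | h
      · exact ⟨0, by rw [pvD_zero]; simp; omega⟩
      · exact ⟨(pvNodes deps).length, h⟩
    have hK : n ≤ ((pvD deps (Nat.find hex)).length : Int) := Nat.find_spec hex
    have hmin : ∀ j < Nat.find hex, ¬ (n ≤ ((pvD deps j).length : Int)) :=
      fun j hj => Nat.find_min hex hj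
    have hsat : n ≤ ((pvD deps (pvNodes deps).length).length : Int) := by
      rcases hpre with h | h
      · have h0 : n ≤ 0 := by omega
        calc n ≤ 0 := h0
          _ ≤ _ := Int.natCast_nonneg _
      · exact h
    have hKle : Nat.find hex ≤ (pvNodes deps).length := Nat.find_min' hex hsat
    have hKle2 : Nat.find hex ≤ 2 * deps.length + 1 :=
      le_trans hKle (by have := length_pvNodes_le deps; omega)
    rw [minSprint_char deps n hn (Nat.find hex) hK hmin hKle2,
      minSprint_alt_char deps n hn (Nat.find hex) hK hmin hKle2]
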